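-- pv_equiv track=rewrite | github.com/sheamus-hei/whiteboarding | misc/match_phone_codes.py | match2
-- ===== SOURCE A (Python) =====
-- def match2(prefixes, numbers):
--
--         #make a new list to save the matching prefixes
-- 	    matching = []
--
-- 	    # iterate through numbers to find a match for each
-- 	    for i, num in enumerate(numbers):
--               while len(num) > 1:
--                 if num in prefixes:
--                       # take the first prefix value that matches
--                     matching.append(num)
--                     break
--                 num = num[:-1]
--
--               if len(matching) < i + 1:
--                   # add an empty string if no match is found
--                 matching.append("")
--
-- 	    return matching
-- ===== SOURCE B (Python) =====
-- def match2(prefixes, numbers):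
--     # One pass over the prefix list per number: keep the longest prefix (len >= 2)
--     # of the number seen so far, instead of truncating the number char by char
--     # and doing a list membership scan at each length.
--     result = []
--     for num in numbers:
--         best = ""
--         for p in prefixes:
--             if len(p) > 1 and len(p) > len(best) and num.startswith(p):
--                 best = p
--         result.append(best)
--     return result
-- ===== Notes on version B (the rewrite author's own statement) =====
-- stated objective: alternative
-- what changed: A repeatedly truncates each number from the right and scans the prefix list for an exact match at every length; B makes a single pass over the prefix list per number, keeping the longest prefix of length >= 2 that the number starts with.
import Mathlib
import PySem

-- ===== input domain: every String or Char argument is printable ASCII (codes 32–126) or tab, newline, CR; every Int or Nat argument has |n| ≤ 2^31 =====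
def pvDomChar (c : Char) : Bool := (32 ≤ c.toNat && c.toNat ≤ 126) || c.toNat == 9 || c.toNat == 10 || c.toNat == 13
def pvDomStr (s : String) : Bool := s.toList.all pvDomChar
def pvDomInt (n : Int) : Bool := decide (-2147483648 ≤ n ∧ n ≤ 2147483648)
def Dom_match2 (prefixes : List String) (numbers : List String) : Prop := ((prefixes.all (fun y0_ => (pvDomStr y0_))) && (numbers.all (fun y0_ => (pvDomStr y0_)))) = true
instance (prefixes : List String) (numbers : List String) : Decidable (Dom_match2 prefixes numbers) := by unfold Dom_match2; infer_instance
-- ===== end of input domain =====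

-- B replaces A's per-number truncation loop with list-membership scans by a single
-- pass over the prefix list per number that keeps the longest matching prefix
-- (objective: alternative single-pass decomposition).


-- ===== PORT A =====
-- the 'while len(num) > 1: if num in prefixes: matching.append(num); break; num = num[:-1]' loop
-- (num[:-1] = dropLast, PySem.List.slice_to_neg_one; num carried as List Char)
def match2While (prefixes : List String) (num : List Char) (matching : List String) : List String :=
  if 1 < num.length then
    if String.ofList num ∈ prefixes then matching ++ [String.ofList num]
    else match2While prefixes num.dropLast matching
  else matching
termination_by num.length
decreasing_by simp [List.length_dropLast]; omega

-- 'for i, num in enumerate(numbers): <while>; if len(matching) < i + 1: matching.append("")'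
def match2Outer (prefixes : List String) (items : List (Int × String)) (matching : List String) : List String :=
  match items with
  | [] => matching
  | (i, num) :: rest =>
      let m1 := match2While prefixes num.toList matching
      let m2 := if (m1.length : Int) < i + 1 then m1 ++ [""] else m1
      match2Outer prefixes rest m2

def match2 (prefixes : List String) (numbers : List String) : List String :=
  match2Outer prefixes (PySem.List.enumerate numbers 0) []

-- ===== PORT B =====
def match2_alt (prefixes : List String) (numbers : List String) : List String :=
  numbers.map (fun num =>
    prefixes.foldl (fun best p =>
      if 1 < p.length ∧ best.length < p.length ∧ PySem.Str.startswith num p then p else best) "")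

-- ===== PRECONDITION & SPEC =====
def Spec_match2 (prefixes : List String) (numbers : List String) (out : List String) : Prop := out = match2_alt prefixes numbers
instance (prefixes : List String) (numbers : List String) (out : List String) : Decidable (Spec_match2 prefixes numbers out) := by unfold Spec_match2; infer_instance

-- ===== CLAIM (what is proved, stated in full; the proofs are below) =====
def Claim_equal_match2 : Prop := ∀ (prefixes : List String) (numbers : List String), Dom_match2 prefixes numbers → Spec_match2 prefixes numbers (match2 prefixes numbers)

-- ===== LEMMAS AND PROOFS =====

-- a 'good' candidate for number num: length ≥ 2 and a prefix of num
def GoodP (num p : String) : Prop := 1 < p.length ∧ p.toList <+: num.toList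

-- B's inner fold, named for the proofs
def bfold (prefixes : List String) (num : String) : String :=
  prefixes.foldl (fun best p =>
    if 1 < p.length ∧ best.length < p.length ∧ PySem.Str.startswith num p then p else best) ""

theorem goodP_iff (num p : String) :
    (1 < p.length ∧ PySem.Str.startswith num p = true) ↔ GoodP num p := by
  simp [GoodP, PySem.Chars.startswith_iff]

-- invariant of B's fold
theorem bfold_inv (num : String) : ∀ (l : List String) (best : String),
    (best = "" ∨ GoodP num best) →
    let r := l.foldl (fun best p =>
      if 1 < p.length ∧ best.length < p.length ∧ PySem.Str.startswith num p then p else best) best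
    (r = "" ∨ GoodP num r) ∧ (∀ p ∈ l, GoodP num p → p.length ≤ r.length) ∧
      best.length ≤ r.length ∧ (r = best ∨ r ∈ l) := by
  intro l
  induction l with
  | nil => intro best h; exact ⟨h, by simp, le_refl _, Or.inl rfl⟩
  | cons p rest ih =>
    intro best h
    simp only [List.foldl_cons]
    by_cases hc : 1 < p.length ∧ best.length < p.length ∧ PySem.Str.startswith num p
    · rw [if_pos hc]
      have hg : GoodP num p := (goodP_iff num p).1 ⟨hc.1, hc.2.2⟩
      obtain ⟨h1, h2, h3, h4⟩ := ih p (Or.inr hg)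
      refine ⟨h1, ?_, le_trans (le_of_lt hc.2.1) h3, ?_⟩
      · intro q hq hgq
        rcases List.mem_cons.1 hq with hq' | hq'
        · subst hq'; exact h3
        · exact h2 q hq' hgq
      · rcases h4 with h4 | h4
        · exact Or.inr (by rw [h4]; exact List.mem_cons_self)
        · exact Or.inr (List.mem_cons_of_mem _ h4)
    · rw [if_neg hc]
      obtain ⟨h1, h2, h3, h4⟩ := ih best h
      refine ⟨h1, ?_, h3, ?_⟩
      · intro q hq hgq
        rcases List.mem_cons.1 hq with hq' | hq'
        · subst hq'
          have hns : PySem.Str.startswith num q = true := by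
            simp [PySem.Chars.startswith_iff]; exact hgq.2
          have hnlt : ¬ best.length < q.length := fun hlt => hc ⟨hgq.1, hlt, hns⟩
          omega
        · exact h2 q hq' hgq
      · rcases h4 with h4 | h4
        · exact Or.inl h4
        · exact Or.inr (List.mem_cons_of_mem _ h4)

-- bfold specialized: its result is "" or a maximal good element of prefixes
theorem bfold_spec (prefixes : List String) (num : String) :
    (bfold prefixes num = "" ∨ GoodP num (bfold prefixes num)) ∧
      (∀ p ∈ prefixes, GoodP num p → p.length ≤ (bfold prefixes num).length) ∧
      (bfold prefixes num = "" ∨ bfold prefixes num ∈ prefixes) := by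
  obtain ⟨h1, h2, _, h4⟩ := bfold_inv num prefixes "" (Or.inl rfl)
  exact ⟨h1, h2, h4⟩

-- the while loop when nothing in prefixes matches
theorem while_no (prefixes : List String) (num : List Char) (matching : List String)
    (h : ∀ p ∈ prefixes, ¬ (1 < p.length ∧ p.toList <+: num)) :
    match2While prefixes num matching = matching := by
  fun_induction match2While prefixes num matching with
  | case1 num hlen hmem =>
      exact absurd ⟨by simpa [String.length_ofList] using hlen,
        by simp [String.toList_ofList]⟩ (h _ hmem)
  | case2 num hlen hmem ih =>
      exact ih (fun p hp hn => h p hp ⟨hn.1, hn.2.trans (List.dropLast_prefix num)⟩)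
  | case3 num hlen => rfl

-- the while loop when s is a maximal good match from prefixes
theorem while_yes (prefixes : List String) (num : List Char) (matching : List String)
    (s : String) (hs : s ∈ prefixes) (hg1 : 1 < s.length) (hg2 : s.toList <+: num)
    (hmax : ∀ p ∈ prefixes, (1 < p.length ∧ p.toList <+: num) → p.length ≤ s.length) :
    match2While prefixes num matching = matching ++ [s] := by
  have hsl : s.toList.length = s.length := by simp
  fun_induction match2While prefixes num matching with
  | case1 num hlen hmem =>
      -- num itself is in prefixes: it is the maximal match, so s = num
      have h1 : num.length ≤ s.length := by
        have := hmax _ hmem ⟨by simpa [String.length_ofList] using hlen,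
          by simp [String.toList_ofList]⟩
        simpa [String.length_ofList] using this
      have hlens : s.toList.length = num.length := by
        have := hg2.length_le; omega
      rw [show String.ofList num = s by rw [← hg2.eq_of_length hlens, String.ofList_toList]]
  | case2 num hlen hmem ih =>
      -- num ∉ prefixes, so s is strictly shorter than num and remains maximal for num.dropLast
      have hslt : s.toList.length < num.length := by
        rcases lt_or_eq_of_le hg2.length_le with hlt | heq
        · exact hlt
        · exact absurd (by rw [← hg2.eq_of_length heq, String.ofList_toList]; exact hs) hmem
      exact ih (by rw [List.dropLast_eq_take, List.prefix_take_iff]; exact ⟨hg2, by omega⟩)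
        (fun p hp hn => hmax p hp ⟨hn.1, hn.2.trans (List.dropLast_prefix num)⟩)
  | case3 num hlen =>
      have := hg2.length_le
      omega

-- one step of the outer loop equals appending B's per-number value
theorem step_eq (prefixes : List String) (num : String) (matching : List String) :
    (if ((match2While prefixes num.toList matching).length : Int) < (matching.length : Int) + 1
     then match2While prefixes num.toList matching ++ [""]
     else match2While prefixes num.toList matching)
    = matching ++ [bfold prefixes num] := by
  obtain ⟨h1, h2, h4⟩ := bfold_spec prefixes num
  rcases h1 with hre | hrg
  · -- no good prefix exists in prefixes
    have hno : ∀ p ∈ prefixes, ¬ (1 < p.length ∧ p.toList <+: num.toList) := by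
      intro p hp hn
      have := h2 p hp hn
      rw [hre] at this
      have h0 : ("" : String).length = 0 := rfl
      omega
    rw [while_no prefixes num.toList matching hno, hre]
    simp
  · -- bfold is a maximal good match, and it is an element of prefixes
    have hrmem : bfold prefixes num ∈ prefixes := by
      rcases h4 with h4 | h4
      · have h0 : ("" : String).length = 0 := rfl
        have := hrg.1
        rw [h4] at this
        omega
      · exact h4
    rw [while_yes prefixes num.toList matching (bfold prefixes num) hrmem hrg.1 hrg.2
        (fun p hp hn => h2 p hp hn)]
    simp

theorem outer_eq (prefixes : List String) : ∀ (rest : List String) (i : Int) (matching : List String),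
    (matching.length : Int) = i →
    match2Outer prefixes (PySem.List.enumerate rest i) matching
      = matching ++ rest.map (bfold prefixes) := by
  intro rest
  induction rest with
  | nil => intro i matching _; simp [PySem.List.enumerate, match2Outer]
  | cons num rest ih =>
    intro i matching hlen
    subst hlen
    rw [show PySem.List.enumerate (num :: rest) (matching.length : Int)
        = ((matching.length : Int), num) :: PySem.List.enumerate rest ((matching.length : Int) + 1) by
      simp [PySem.List.enumerate]]
    show match2Outer prefixes _
        (if ((match2While prefixes num.toList matching).length : Int) < (matching.length : Int) + 1
         then match2While prefixes num.toList matching ++ [""]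
         else match2While prefixes num.toList matching) = _
    rw [step_eq prefixes num matching]
    have hlen' : (((matching ++ [bfold prefixes num]).length : ℕ) : Int) = (matching.length : Int) + 1 := by
      simp
    rw [ih ((matching.length : Int) + 1) (matching ++ [bfold prefixes num]) hlen']
    simp

-- ===== VERDICT (by name: the statement is the Claim_ definition above) =====
theorem match2_spec : Claim_equal_match2 := by
  intro prefixes numbers _
  unfold Spec_match2 match2 match2_alt
  rw [outer_eq prefixes numbers 0 [] (by simp)]
  simp [bfold]
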